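-- pv_equiv track=rewrite | github.com/prettyidol/tess-diffusion | eval_kg_ranking.py | _build_time_index
-- ===== SOURCE A (Python) =====
-- from collections import Counter, defaultdict
-- from typing import Dict, Iterable, List, Sequence, Tuple
--
-- Quad = Tuple[str, str, str, str]
--
-- def _build_time_index(
--     quads: List[Quad], mode: str
-- ) -> Dict[Tuple[str, str], Dict[str, List[str]]]:
--     """Build index: group_key -> {entity: sorted list of times}.
--
--     - tail mode groups by (h, r) and indexes tails t by time
--     - head mode groups by (r, t) and indexes heads h by time
--     """
--     idx: Dict[Tuple[str, str], Dict[str, List[str]]] = defaultdict(lambda: defaultdict(list))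
--     if mode == "tail":
--         for h, r, t, tf in quads:
--             idx[(h, r)][t].append(tf)
--     else:
--         for h, r, t, tf in quads:
--             idx[(r, t)][h].append(tf)
--     # sort times per entity
--     for _, ents in idx.items():
--         for ent, times in ents.items():
--             times.sort()
--     return idx
-- ===== SOURCE B (Python) =====
-- from collections import defaultdict
-- from typing import Dict, List, Tuple
--
-- Quad = Tuple[str, str, str, str]
--
--
-- def _insort(times: List[str], tf: str) -> None:
--     """Insert tf into the sorted list `times`, after any equal elements."""
--     i = 0
--     while i < len(times) and times[i] <= tf:
--         i += 1
--     times.insert(i, tf)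
--
--
-- def _build_time_index(
--     quads: List[Quad], mode: str
-- ) -> Dict[Tuple[str, str], Dict[str, List[str]]]:
--     """Single pass: keep each per-entity time list sorted as it is built,
--     instead of grouping first and sorting every list afterwards."""
--     idx: Dict[Tuple[str, str], Dict[str, List[str]]] = defaultdict(lambda: defaultdict(list))
--     if mode == "tail":
--         for h, r, t, tf in quads:
--             _insort(idx[(h, r)][t], tf)
--     else:
--         for h, r, t, tf in quads:
--             _insort(idx[(r, t)][h], tf)
--     return idx
-- ===== Notes on version B (the rewrite author's own statement) =====
-- stated objective: alternative
-- what changed: B builds the index in a single pass that keeps every per-entity time list sorted by inserting each time at its sorted position (online insertion), instead of A's group-everything pass followed by a separate sort of every list.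
import Mathlib
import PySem

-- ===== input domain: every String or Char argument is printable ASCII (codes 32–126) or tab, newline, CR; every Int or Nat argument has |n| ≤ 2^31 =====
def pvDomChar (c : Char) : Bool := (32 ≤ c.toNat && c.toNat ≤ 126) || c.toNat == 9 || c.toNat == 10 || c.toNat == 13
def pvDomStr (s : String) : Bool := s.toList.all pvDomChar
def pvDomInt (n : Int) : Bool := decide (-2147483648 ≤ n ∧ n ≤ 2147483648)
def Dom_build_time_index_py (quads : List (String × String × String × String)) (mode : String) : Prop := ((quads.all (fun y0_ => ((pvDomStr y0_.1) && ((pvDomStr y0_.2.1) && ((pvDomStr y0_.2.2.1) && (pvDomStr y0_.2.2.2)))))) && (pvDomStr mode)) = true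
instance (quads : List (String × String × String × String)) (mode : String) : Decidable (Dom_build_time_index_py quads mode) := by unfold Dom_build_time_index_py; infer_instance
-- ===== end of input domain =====

-- B replaces A's group-then-sort-each-list two-phase build by a single grouping
-- pass that inserts every time at its sorted position (online insertion); same result.

-- ===== PORT A =====
-- A: group pass (defaultdict append), then sort every per-entity list.
def build_time_index_py (quads : List (String × String × String × String)) (mode : String) : List (String × String × List (String × List String)) :=
  let idx : PySem.Dict (String × String) (PySem.Dict String (List String)) :=
    if mode == "tail" then
      quads.foldl (fun d q =>
        d.modify (q.1, q.2.1) PySem.Dict.empty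
          (fun inner => inner.modify q.2.2.1 [] (fun l => l ++ [q.2.2.2]))) PySem.Dict.empty
    else
      quads.foldl (fun d q =>
        d.modify (q.2.1, q.2.2.1) PySem.Dict.empty
          (fun inner => inner.modify q.1 [] (fun l => l ++ [q.2.2.2]))) PySem.Dict.empty
  -- final loop: times.sort() for every entity list (in place ⇒ rebuild the dict)
  let idx2 : PySem.Dict (String × String) (PySem.Dict String (List String)) :=
    PySem.Dict.mk (idx.items.map (fun p =>
      (p.1, PySem.Dict.mk (p.2.items.map (fun e => (e.1, PySem.List.sorted e.2 (fun x => x) false))))))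
  idx2.items.map (fun p => (p.1.1, p.1.2, p.2.items))

-- ===== PORT B =====
-- B helper: _insort — walk past elements ≤ tf, insert tf there (in-place in Python).
def pvInsort (tf : String) : List String → List String
  | [] => [tf]
  | y :: ys => if y ≤ tf then y :: pvInsort tf ys else tf :: y :: ys

def build_time_index_py_alt (quads : List (String × String × String × String)) (mode : String) : List (String × String × List (String × List String)) :=
  let idx : PySem.Dict (String × String) (PySem.Dict String (List String)) :=
    if mode == "tail" then
      quads.foldl (fun d q =>
        d.modify (q.1, q.2.1) PySem.Dict.empty
          (fun inner => inner.modify q.2.2.1 [] (pvInsort q.2.2.2))) PySem.Dict.empty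
    else
      quads.foldl (fun d q =>
        d.modify (q.2.1, q.2.2.1) PySem.Dict.empty
          (fun inner => inner.modify q.1 [] (pvInsort q.2.2.2))) PySem.Dict.empty
  idx.items.map (fun p => (p.1.1, p.1.2, p.2.items))

-- ===== PRECONDITION & SPEC =====
def Spec_build_time_index_py (quads : List (String × String × String × String)) (mode : String) (out : List (String × String × List (String × List String))) : Prop := out = build_time_index_py_alt quads mode
instance (quads : List (String × String × String × String)) (mode : String) (out : List (String × String × List (String × List String))) : Decidable (Spec_build_time_index_py quads mode out) := by unfold Spec_build_time_index_py; infer_instance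

-- ===== CLAIM (what is proved, stated in full; the proofs are below) =====
def Claim_equal_build_time_index_py : Prop := ∀ (quads : List (String × String × String × String)) (mode : String), Dom_build_time_index_py quads mode → Spec_build_time_index_py quads mode (build_time_index_py quads mode)

-- ===== LEMMAS AND PROOFS =====

-- map a function over every value of a dict (keys and order untouched)
def pvMapVal {κ ν ν' : Type} (g : ν → ν') (d : PySem.Dict κ ν) : PySem.Dict κ ν' :=
  PySem.Dict.mk (d.items.map (fun p => (p.1, g p.2)))

-- sort every time list of an inner dict / of the whole index
def pvSortInner (d : PySem.Dict String (List String)) : PySem.Dict String (List String) :=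
  pvMapVal (fun ts => PySem.List.sorted ts (fun x => x) false) d

theorem pvInsort_eq_insertBy (tf : String) (ys : List String) :
    pvInsort tf ys = PySem.List.insertBy (fun a b => decide (a < b)) tf ys := by
  induction ys with
  | nil => rfl
  | cons y ys ih =>
    simp only [pvInsort, PySem.List.insertBy, ih]
    by_cases h : y ≤ tf
    · simp [h, not_lt_of_ge h]
    · simp [h, lt_of_not_ge h]

theorem pvInsort_sorted (tf : String) (l : List String) :
    pvInsort tf (PySem.List.sorted l (fun x => x) false)
      = PySem.List.sorted (l ++ [tf]) (fun x => x) false := by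
  rw [pvInsort_eq_insertBy, PySem.List.sorted_eq_foldl_insertBy,
      PySem.List.sorted_eq_foldl_insertBy, List.foldl_append]
  rfl

theorem pvMapVal_contains {κ ν ν' : Type} [BEq κ] (g : ν → ν') (d : PySem.Dict κ ν) (k : κ) :
    (pvMapVal g d).contains k = d.contains k := by
  simp [pvMapVal, PySem.Dict.contains, List.any_map, Function.comp_def]

theorem pvMapVal_getD {κ ν ν' : Type} [BEq κ] (g : ν → ν') (d : PySem.Dict κ ν) (k : κ)
    (d0 : ν) : (pvMapVal g d).getD k (g d0) = g (d.getD k d0) := by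
  simp only [pvMapVal, PySem.Dict.getD, PySem.Dict.get?, List.find?_map]
  cases h : List.find? ((fun p => p.1 == k) ∘ fun p => (p.1, g p.2)) d.items with
  | none =>
    have : List.find? (fun p => p.1 == k) d.items = none := by
      simpa [Function.comp] using h
    simp [this]
  | some p =>
    have : List.find? (fun p => p.1 == k) d.items = some p := by
      simpa [Function.comp] using h
    simp [this]

theorem pvMapVal_insert {κ ν ν' : Type} [BEq κ] (g : ν → ν') (d : PySem.Dict κ ν)
    (k : κ) (v : ν) : pvMapVal g (d.insert k v) = (pvMapVal g d).insert k (g v) := by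
  by_cases h : d.contains k = true
  · simp only [PySem.Dict.insert, pvMapVal_contains, h, if_true]
    simp only [pvMapVal, List.map_map]
    congr 1
    apply List.map_congr_left
    intro p _
    by_cases hp : p.1 == k <;> simp [hp]
  · simp only [PySem.Dict.insert, pvMapVal_contains, h]
    simp [pvMapVal]

theorem pvMapVal_modify {κ ν ν' : Type} [BEq κ] (g : ν → ν') (d : PySem.Dict κ ν)
    (k : κ) (d0 : ν) (f : ν → ν) (f' : ν' → ν') (hc : ∀ v, f' (g v) = g (f v)) :
    pvMapVal g (d.modify k d0 f) = (pvMapVal g d).modify k (g d0) f' := by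
  simp only [PySem.Dict.modify, pvMapVal_insert, pvMapVal_getD, hc]

theorem pvSortInner_step (e tf : String) (inner : PySem.Dict String (List String)) :
    pvSortInner (inner.modify e [] (fun l => l ++ [tf]))
      = (pvSortInner inner).modify e [] (pvInsort tf) := by
  have := pvMapVal_modify (fun ts => PySem.List.sorted ts (fun x => x) false) inner e []
    (fun l => l ++ [tf]) (pvInsort tf) (fun v => pvInsort_sorted tf v)
  simpa [pvSortInner] using this

theorem pvSortAll_step (k : String × String) (e tf : String)
    (d : PySem.Dict (String × String) (PySem.Dict String (List String))) :
    pvMapVal pvSortInner (d.modify k PySem.Dict.empty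
        (fun inner => inner.modify e [] (fun l => l ++ [tf])))
      = (pvMapVal pvSortInner d).modify k PySem.Dict.empty
        (fun inner => inner.modify e [] (pvInsort tf)) := by
  have := pvMapVal_modify pvSortInner d k PySem.Dict.empty
    (fun inner => inner.modify e [] (fun l => l ++ [tf]))
    (fun inner => inner.modify e [] (pvInsort tf))
    (fun v => (pvSortInner_step e tf v).symm)
  simpa using this

theorem pv_fold_tail (quads : List (String × String × String × String))
    (d : PySem.Dict (String × String) (PySem.Dict String (List String))) :
    quads.foldl (fun d q =>
        d.modify (q.1, q.2.1) PySem.Dict.empty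
          (fun inner => inner.modify q.2.2.1 [] (pvInsort q.2.2.2))) (pvMapVal pvSortInner d)
      = pvMapVal pvSortInner (quads.foldl (fun d q =>
        d.modify (q.1, q.2.1) PySem.Dict.empty
          (fun inner => inner.modify q.2.2.1 [] (fun l => l ++ [q.2.2.2]))) d) := by
  induction quads generalizing d with
  | nil => rfl
  | cons q qs ih =>
    simp only [List.foldl_cons, ← pvSortAll_step, ih]

theorem pv_fold_head (quads : List (String × String × String × String))
    (d : PySem.Dict (String × String) (PySem.Dict String (List String))) :
    quads.foldl (fun d q =>
        d.modify (q.2.1, q.2.2.1) PySem.Dict.empty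
          (fun inner => inner.modify q.1 [] (pvInsort q.2.2.2))) (pvMapVal pvSortInner d)
      = pvMapVal pvSortInner (quads.foldl (fun d q =>
        d.modify (q.2.1, q.2.2.1) PySem.Dict.empty
          (fun inner => inner.modify q.1 [] (fun l => l ++ [q.2.2.2]))) d) := by
  induction quads generalizing d with
  | nil => rfl
  | cons q qs ih =>
    simp only [List.foldl_cons, ← pvSortAll_step, ih]

-- ===== VERDICT (by name: the statement is the Claim_ definition above) =====
theorem build_time_index_py_spec : Claim_equal_build_time_index_py := by
  intro quads mode _
  unfold Spec_build_time_index_py build_time_index_py build_time_index_py_alt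
  by_cases hm : mode == "tail"
  · simp only [hm, if_true]
    rw [show (PySem.Dict.empty : PySem.Dict (String × String) (PySem.Dict String (List String)))
          = pvMapVal pvSortInner PySem.Dict.empty from rfl,
        pv_fold_tail]
    rfl
  · simp only [hm]
    rw [show (PySem.Dict.empty : PySem.Dict (String × String) (PySem.Dict String (List String)))
          = pvMapVal pvSortInner PySem.Dict.empty from rfl,
        pv_fold_head]
    rfl
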